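-- pv_equiv track=rewrite | github.com/thatfreakcoder/Google-Foobar | Level 2/number-station-coded-messages/solution.py | solution
-- ===== SOURCE A (Python) =====
-- def solution(lis, key):
--     a=[-1,-1]
--     c=lis
--     for keyi,i in enumerate(c):
--         for keyj,j in enumerate(c):
--             if sum(lis[keyi:keyj+1]) == key:
--                 return [keyi, keyj]
--     return a
-- ===== SOURCE B (Python) =====
-- def solution(lis, key):
--     pref = [0]
--     for v in lis:
--         pref.append(pref[-1] + v)
--     n = len(lis)
--     for i in range(n):
--         for j in range(i, n):
--             if pref[j + 1] - pref[i] == key: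
--                 return [i, j]
--     return [-1, -1]
-- ===== Notes on version B (the rewrite author's own statement) =====
-- stated objective: faster
-- what changed: B builds a prefix-sum list once and scans pairs i <= j with an O(1) range-sum lookup, instead of A's re-summing a fresh slice for every (keyi, keyj) pair including the spurious keyj < keyi ones.
-- intended difference: When key = 0, the list has at least 2 elements and no prefix of lis sums to 0, A returns [1, 0] - the indices of the empty slice lis[1:1], an artefact of its inner loop also scanning keyj < keyi - while B returns the first real subarray [i, j] with i <= j summing to 0, or [-1, -1] if none, which is the intended answer. — e.g. on solution([1, 2], 0): A returns [1, 0], B returns [-1, -1]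
import Mathlib
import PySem

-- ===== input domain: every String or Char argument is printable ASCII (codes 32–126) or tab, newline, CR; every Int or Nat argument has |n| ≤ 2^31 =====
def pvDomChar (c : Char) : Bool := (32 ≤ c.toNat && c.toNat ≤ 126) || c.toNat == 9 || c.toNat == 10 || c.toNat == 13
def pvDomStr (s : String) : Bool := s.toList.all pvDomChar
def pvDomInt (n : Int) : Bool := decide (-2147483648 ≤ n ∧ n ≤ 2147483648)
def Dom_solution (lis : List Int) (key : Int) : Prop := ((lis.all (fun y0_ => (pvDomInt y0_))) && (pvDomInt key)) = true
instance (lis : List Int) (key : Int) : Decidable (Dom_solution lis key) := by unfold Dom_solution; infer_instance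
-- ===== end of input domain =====

-- B replaces A's O(n^3) rescan (sum of a fresh slice for every index pair, including the
-- spurious keyj < keyi pairs) by a prefix-sum list and an O(1) range-sum check over i ≤ j only.

-- ===== PORT A =====
def solution (lis : List Int) (key : Int) : List Int :=
  let a : List Int := [-1, -1]
  let c := lis
  match List.findSome? (fun ki : Int × Int =>
      List.findSome? (fun kj : Int × Int =>
        if (PySem.List.slice lis (some ki.1) (some (kj.1 + 1))).sum = key then
          some [ki.1, kj.1]
        else none) (PySem.List.enumerate c)) (PySem.List.enumerate c) with
  | some r => r
  | none => a

-- ===== PORT B =====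
def solution_alt (lis : List Int) (key : Int) : List Int :=
  let pref := lis.foldl (fun acc v => acc ++ [PySem.List.pyGetD acc (-1) 0 + v]) [0]
  let n : Int := lis.length
  match List.findSome? (fun i =>
      List.findSome? (fun j =>
        if PySem.List.pyGetD pref (j + 1) 0 - PySem.List.pyGetD pref i 0 = key then
          some [i, j]
        else none) (PySem.List.pyRange i n 1)) (PySem.List.pyRange 0 n 1) with
  | some r => r
  | none => [-1, -1]

-- ===== PRECONDITION & SPEC =====
-- When key = 0, the list has at least 2 elements and no prefix of lis sums to 0, A returns
-- [1, 0] — the indices of the EMPTY slice lis[1:1], an artefact of its inner loop also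
-- scanning keyj < keyi — while B returns the first real subarray [i, j] with i ≤ j summing
-- to 0 (or [-1, -1] if none), which is the intended answer.
def D_solution (lis : List Int) (key : Int) : Prop :=
  key = 0 ∧ 2 ≤ lis.length ∧ ∀ k < lis.length, (lis.take (k + 1)).sum ≠ 0
instance (lis : List Int) (key : Int) : Decidable (D_solution lis key) := by
  unfold D_solution; infer_instance

def Spec_solution (lis : List Int) (key : Int) (out : List Int) : Prop :=
  ¬ D_solution lis key → out = solution_alt lis key
instance (lis : List Int) (key : Int) (out : List Int) : Decidable (Spec_solution lis key out) := by
  unfold Spec_solution; infer_instance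

def pvDiffWitness_solution : List Int × Int := ([1, 2], 0)
def pvDiffWitnessOut_solution : (List Int) × (List Int) := ([1, 0], [-1, -1])

-- ===== CLAIM (what is proved, stated in full; the proofs are below) =====
def Claim_unchanged_solution : Prop := ∀ (lis : List Int) (key : Int), Dom_solution lis key → Spec_solution lis key (solution lis key)
def Claim_changed_solution : Prop := Dom_solution (pvDiffWitness_solution.1) (pvDiffWitness_solution.2) ∧ D_solution (pvDiffWitness_solution.1) (pvDiffWitness_solution.2) ∧ solution (pvDiffWitness_solution.1) (pvDiffWitness_solution.2) = pvDiffWitnessOut_solution.1 ∧ solution_alt (pvDiffWitness_solution.1) (pvDiffWitness_solution.2) = pvDiffWitnessOut_solution.2 ∧ pvDiffWitnessOut_solution.1 ≠ pvDiffWitnessOut_solution.2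
def Claim_exact_solution : Prop := ∀ (lis : List Int) (key : Int), Dom_solution lis key → D_solution lis key → solution lis key ≠ solution_alt lis key

-- ===== LEMMAS AND PROOFS =====

-- the prefix-sum list B builds, in closed form
def prefL (lis : List Int) : List Int := List.scanl (· + ·) 0 lis

-- A's inner loop at outer index i, with the outer enumerate already reduced to its indices
def innerA (lis : List Int) (key i : Int) : Option (List Int) :=
  List.findSome? (fun j =>
    if (PySem.List.slice lis (some i) (some (j + 1))).sum = key then some [i, j] else none)
    (PySem.List.pyRange 0 (lis.length : Int) 1)

-- B's inner loop at outer index i, with pref in closed form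
def innerB (lis : List Int) (key i : Int) : Option (List Int) :=
  List.findSome? (fun j =>
    if PySem.List.pyGetD (prefL lis) (j + 1) 0 - PySem.List.pyGetD (prefL lis) i 0 = key then
      some [i, j]
    else none) (PySem.List.pyRange i (lis.length : Int) 1)

theorem findSome?_mem_congr {α β : Type} {f g : α → Option β} :
    ∀ {l : List α}, (∀ x ∈ l, f x = g x) → List.findSome? f l = List.findSome? g l := by
  intro l
  induction l with
  | nil => intro _; rfl
  | cons x xs ih =>
    intro h
    rw [List.findSome?_cons, List.findSome?_cons, h x (List.mem_cons_self), ih (fun y hy => h y (List.mem_cons_of_mem _ hy))]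

theorem pref_fold (xs : List Int) : ∀ (acc : List Int) (s : Int),
    xs.foldl (fun a v => a ++ [PySem.List.pyGetD a (-1) 0 + v]) (acc ++ [s]) =
      acc ++ List.scanl (· + ·) s xs := by
  induction xs with
  | nil => intro acc s; simp [List.scanl]
  | cons v xs ih =>
    intro acc s
    rw [List.foldl_cons]
    show List.foldl _ ((acc ++ [s]) ++ [PySem.List.pyGetD (acc ++ [s]) (-1) 0 + v]) xs = _
    rw [PySem.List.pyGetD_neg_one_append_singleton, ih (acc ++ [s]) (s + v),
      List.scanl_cons, List.append_assoc, List.singleton_append]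

theorem scanl_getD (xs : List Int) : ∀ (s : Int) (k : Nat), k ≤ xs.length →
    (List.scanl (· + ·) s xs).getD k 0 = s + (xs.take k).sum := by
  induction xs with
  | nil =>
    intro s k hk
    have : k = 0 := by simpa using hk
    subst this
    simp [List.scanl]
  | cons v xs ih =>
    intro s k hk
    rw [List.scanl_cons]
    cases k with
    | zero => simp
    | succ k =>
      rw [List.getD_cons_succ, ih (s + v) k (by simpa using hk), List.take_succ_cons,
        List.sum_cons]
      ring

theorem prefL_get (lis : List Int) (k : Nat) (h : k ≤ lis.length) :
    PySem.List.pyGetD (prefL lis) (k : Int) 0 = (lis.take k).sum := by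
  rw [PySem.List.pyGetD_natCast, prefL, scanl_getD lis 0 k h, Int.zero_add]

theorem slice_sum_sub (lis : List Int) (a b : Nat) (h : a ≤ b) :
    ((lis.drop a).take (b - a)).sum = (lis.take b).sum - (lis.take a).sum := by
  have hb : b = a + (b - a) := by omega
  have := List.take_add (l := lis) (i := a) (j := b - a)
  rw [← hb] at this
  rw [this, List.sum_append]
  ring

-- on i ≤ j both predicates compare the same number with key
theorem pred_bridge (lis : List Int) (i j : Int) (hi : 0 ≤ i) (hij : i ≤ j)
    (hj : j < (lis.length : Int)) :
    (PySem.List.slice lis (some i) (some (j + 1))).sum =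
      PySem.List.pyGetD (prefL lis) (j + 1) 0 - PySem.List.pyGetD (prefL lis) i 0 := by
  have hia : i = (i.toNat : Int) := (Int.toNat_of_nonneg hi).symm
  have hjb : j + 1 = ((j + 1).toNat : Int) := (Int.toNat_of_nonneg (by omega)).symm
  rw [hia, hjb, PySem.List.slice_natCast, prefL_get lis (j + 1).toNat (by omega),
    prefL_get lis i.toNat (by omega), slice_sum_sub lis i.toNat (j + 1).toNat (by omega)]

theorem inner_eq (lis : List Int) (key i : Int) (hi : 0 ≤ i) (hin : i ≤ (lis.length : Int))
    (h : key ≠ 0 ∨ i = 0) : innerA lis key i = innerB lis key i := by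
  rw [innerA, innerB, PySem.List.pyRange_one_append 0 i (lis.length : Int) hi hin,
    List.findSome?_append]
  have h1 : List.findSome? (fun j =>
      if (PySem.List.slice lis (some i) (some (j + 1))).sum = key then some [i, j] else none)
      (PySem.List.pyRange 0 i 1) = none := by
    rw [List.findSome?_eq_none_iff]
    intro j hj
    rw [PySem.List.mem_pyRange_one] at hj
    rcases h with hk | h0
    · have hslice : PySem.List.slice lis (some i) (some (j + 1)) = [] := by
        rw [PySem.List.slice_toNat lis hi (by omega)]
        have hz : (j + 1).toNat - i.toNat = 0 := by omega
        rw [hz]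
        simp
      rw [hslice]
      simp only [List.sum_nil]
      exact if_neg (fun hc => hk hc.symm)
    · exact absurd hj.2 (by omega)
  rw [h1, Option.none_or]
  apply findSome?_mem_congr
  intro j hj
  rw [PySem.List.mem_pyRange_one] at hj
  rw [pred_bridge lis i j hi hj.1 hj.2]

theorem enum_conv {β : Type} (lis : List Int) (g : Int → Option β) :
    List.findSome? (fun p : Int × Int => g p.1) (PySem.List.enumerate lis) =
      List.findSome? g (PySem.List.pyRange 0 (lis.length : Int) 1) := by
  have h := PySem.List.map_fst_enumerate lis 0
  rw [zero_add] at h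
  rw [← h, List.findSome?_map]
  rfl

theorem solution_eq (lis : List Int) (key : Int) :
    solution lis key =
      match List.findSome? (fun i => innerA lis key i) (PySem.List.pyRange 0 (lis.length : Int) 1) with
      | some r => r
      | none => [-1, -1] := by
  rw [solution]
  have hout := enum_conv lis (fun i =>
    List.findSome? (fun kj : Int × Int =>
      if (PySem.List.slice lis (some i) (some (kj.1 + 1))).sum = key then some [i, kj.1]
      else none) (PySem.List.enumerate lis))
  rw [hout]
  have hin : (fun i =>
      List.findSome? (fun kj : Int × Int =>
        if (PySem.List.slice lis (some i) (some (kj.1 + 1))).sum = key then some [i, kj.1]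
        else none) (PySem.List.enumerate lis)) = fun i => innerA lis key i := by
    funext i
    rw [innerA]
    exact enum_conv lis (fun j =>
      if (PySem.List.slice lis (some i) (some (j + 1))).sum = key then some [i, j] else none)
  rw [hin]

theorem solution_alt_eq (lis : List Int) (key : Int) :
    solution_alt lis key =
      match List.findSome? (fun i => innerB lis key i) (PySem.List.pyRange 0 (lis.length : Int) 1) with
      | some r => r
      | none => [-1, -1] := by
  have hp : lis.foldl (fun a v => a ++ [PySem.List.pyGetD a (-1) 0 + v]) [0] = prefL lis := by
    have h := pref_fold lis [] 0
    simpa [prefL] using h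
  rw [solution_alt]
  rw [hp]
  rfl

theorem prefL_zero (lis : List Int) : PySem.List.pyGetD (prefL lis) 0 0 = 0 := by
  cases lis <;> simp [prefL, List.scanl, PySem.List.pyGetD_zero_cons]

theorem outer_eq (lis : List Int) (key : Int) (hnd : ¬ D_solution lis key) :
    List.findSome? (fun i => innerA lis key i) (PySem.List.pyRange 0 (lis.length : Int) 1) =
      List.findSome? (fun i => innerB lis key i) (PySem.List.pyRange 0 (lis.length : Int) 1) := by
  by_cases hk : key = 0
  · by_cases hz : ∃ k, k < lis.length ∧ (lis.take (k + 1)).sum = 0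
    · obtain ⟨k, hkn, hks⟩ := hz
      have hn : (0 : Int) < lis.length := by exact_mod_cast (by omega : 0 < lis.length)
      rw [PySem.List.pyRange_one_cons hn, List.findSome?_cons, List.findSome?_cons,
        inner_eq lis key 0 le_rfl (by omega) (Or.inr rfl)]
      have hsome : innerB lis key 0 ≠ none := by
        intro hnone
        rw [innerB, List.findSome?_eq_none_iff] at hnone
        have hmem : (k : Int) ∈ PySem.List.pyRange 0 (lis.length : Int) 1 := by
          rw [PySem.List.mem_pyRange_one]
          constructor
          · omega
          · exact_mod_cast hkn
        have hpred := hnone (k : Int) hmem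
        rw [show ((k : Int) + 1) = ((k + 1 : Nat) : Int) by push_cast; ring,
          prefL_get lis (k + 1) (by omega), prefL_zero, hks, hk] at hpred
        simp at hpred
      cases hI : innerB lis key 0 with
      | none => exact absurd hI hsome
      | some r => rfl
    · push Not at hz
      have hn1 : lis.length ≤ 1 := by
        by_contra hc
        exact hnd ⟨hk, by omega, hz⟩
      apply findSome?_mem_congr
      intro i hi
      rw [PySem.List.mem_pyRange_one] at hi
      have hlen : (lis.length : Int) ≤ 1 := by exact_mod_cast hn1
      have hi0 : i = 0 := by omega
      subst hi0
      exact inner_eq lis key 0 le_rfl (by omega) (Or.inr rfl)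
  · apply findSome?_mem_congr
    intro i hi
    rw [PySem.List.mem_pyRange_one] at hi
    exact inner_eq lis key i hi.1 (le_of_lt hi.2) (Or.inl hk)

theorem alt_shape (lis : List Int) (key : Int) (r : List Int)
    (h : solution_alt lis key = r) : r = [-1, -1] ∨ ∃ i j : Int, i ≤ j ∧ r = [i, j] := by
  rw [solution_alt_eq] at h
  cases hO : List.findSome? (fun i => innerB lis key i)
      (PySem.List.pyRange 0 (lis.length : Int) 1) with
  | none =>
    rw [hO] at h
    left
    exact h.symm
  | some r' =>
    rw [hO] at h
    right
    obtain ⟨i, _, hinner⟩ := List.exists_of_findSome?_eq_some hO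
    rw [innerB] at hinner
    obtain ⟨j, hj, hpred⟩ := List.exists_of_findSome?_eq_some hinner
    rw [PySem.List.mem_pyRange_one] at hj
    refine ⟨i, j, hj.1, ?_⟩
    split at hpred
    · cases hpred
      exact h.symm
    · cases hpred

-- ===== VERDICT (by name: the statement is the Claim_ definition above) =====
theorem solution_spec : Claim_unchanged_solution := by
  intro lis key _ hD
  rw [solution_eq, solution_alt_eq, outer_eq lis key hD]

theorem solution_changed : Claim_changed_solution := by
  unfold Claim_changed_solution; decide

theorem solution_tight : Claim_exact_solution := by
  intro lis key _ hD
  obtain ⟨hk, h2, hp⟩ := hD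
  have h0lt : (0 : Int) < lis.length := by exact_mod_cast (by omega : 0 < lis.length)
  have h1lt : (1 : Int) < lis.length := by exact_mod_cast (by omega : 1 < lis.length)
  have hA0 : innerA lis key 0 = none := by
    rw [innerA, List.findSome?_eq_none_iff]
    intro j hj
    rw [PySem.List.mem_pyRange_one] at hj
    have hslice : PySem.List.slice lis (some 0) (some (j + 1)) = lis.take (j + 1).toNat := by
      rw [PySem.List.slice_zero_start, PySem.List.slice_to lis (by omega)]
    rw [hslice]
    have hne : (lis.take (j + 1).toNat).sum ≠ key := by
      rw [hk]
      have hlen : j < (lis.length : Int) := hj.2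
      have h' := hp ((j + 1).toNat - 1) (by omega)
      have heq : (j + 1).toNat - 1 + 1 = (j + 1).toNat := by omega
      rw [heq] at h'
      exact h'
    rw [if_neg hne]
  have hA1 : innerA lis key 1 = some [1, 0] := by
    rw [innerA, PySem.List.pyRange_one_cons h0lt, List.findSome?_cons]
    have hslice : PySem.List.slice lis (some 1) (some ((0 : Int) + 1)) = [] := by
      rw [show ((0 : Int) + 1) = (1 : Int) by ring,
        PySem.List.slice_toNat lis (by omega) (by omega)]
      simp
    rw [hslice]
    simp [hk]
  have hA : solution lis key = [1, 0] := by
    rw [solution_eq, PySem.List.pyRange_one_cons h0lt, List.findSome?_cons, hA0,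
      show (0 : Int) + 1 = 1 by ring, PySem.List.pyRange_one_cons h1lt, List.findSome?_cons,
      hA1]
  have hne : solution_alt lis key ≠ [1, 0] := by
    intro hB
    rcases alt_shape lis key _ rfl with hr | ⟨i, j, hij, hr⟩
    · rw [hB] at hr
      exact absurd hr (by decide)
    · rw [hB] at hr
      have hi : (1 : Int) = i ∧ (0 : Int) = j ∧ True := by simpa using hr
      omega
  rw [hA]
  exact fun hcontra => hne hcontra.symm
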